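-- pv_equiv track=rewrite | github.com/frenchcutgreenbean/UNIT3D-Upload-Checker | src/trackers/base.py | check_quality_match
-- ===== SOURCE A (Python) =====
-- def check_quality_match(file_quality: str, tracker_quality: str) -> bool:
--     """
--     Check if file quality matches tracker quality.
--
--     Args:
--         file_quality: File's quality string
--         tracker_quality: Tracker's quality string
--
--     Returns:
--         True if qualities match, False otherwise
--     """
--     if not file_quality or not tracker_quality:
--         return False
--
--     file_quality = file_quality.lower()
--     tracker_quality = tracker_quality.lower()
--
--     # Direct match
--     if file_quality == tracker_quality:
--         return True
--
--     # Handle common variations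
--     remux_variants = ["remux", "bdremux", "uhd.remux"]
--     bluray_variants = ["bluray", "blu-ray", "bd", "bdrip"]
--     web_variants = ["web", "web-dl", "webdl", "webrip"]
--     hdtv_variants = ["hdtv", "hdtvrip"]
--
--     if any(variant in file_quality for variant in remux_variants):
--         return any(variant in tracker_quality for variant in remux_variants)
--     elif any(variant in file_quality for variant in bluray_variants):
--         return any(variant in tracker_quality for variant in bluray_variants)
--     elif any(variant in file_quality for variant in web_variants):
--         return any(variant in tracker_quality for variant in web_variants)
--     elif any(variant in file_quality for variant in hdtv_variants):
--         return any(variant in tracker_quality for variant in hdtv_variants)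
--
--     return False
-- ===== SOURCE B (Python) =====
-- # Each keyword maps to the bit of its quality category; a string's mask is the
-- # OR of the bits of all keywords occurring in it.
-- KEYWORD_BITS = [
--     ("remux", 1), ("bdremux", 1), ("uhd.remux", 1),
--     ("bluray", 2), ("blu-ray", 2), ("bd", 2), ("bdrip", 2),
--     ("web", 4), ("web-dl", 4), ("webdl", 4), ("webrip", 4),
--     ("hdtv", 8), ("hdtvrip", 8),
-- ]
--
--
-- def _quality_mask(s: str) -> int:
--     mask = 0
--     for kw, bit in KEYWORD_BITS:
--         if kw in s:
--             mask |= bit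
--     return mask
--
--
-- def check_quality_match(file_quality: str, tracker_quality: str) -> bool:
--     if not file_quality or not tracker_quality:
--         return False
--     f = file_quality.lower()
--     t = tracker_quality.lower()
--     if f == t:
--         return True
--     fm = _quality_mask(f)
--     if fm == 0:
--         return False
--     # lowest set bit of fm = the file's highest-priority category
--     low = fm ^ (fm & (fm - 1))
--     return bool(low & _quality_mask(t))
-- ===== Notes on version B (the rewrite author's own statement) =====
-- stated objective: alternative
-- what changed: Instead of A's if/elif cascade that picks the file's first matching group and then scans the tracker against that group, B classifies BOTH strings independently into category bitmasks via one flat pass over a keyword-to-bit table, then decides with lowest-set-bit arithmetic (fm ^ (fm & (fm-1))) & tm.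
import Mathlib
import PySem

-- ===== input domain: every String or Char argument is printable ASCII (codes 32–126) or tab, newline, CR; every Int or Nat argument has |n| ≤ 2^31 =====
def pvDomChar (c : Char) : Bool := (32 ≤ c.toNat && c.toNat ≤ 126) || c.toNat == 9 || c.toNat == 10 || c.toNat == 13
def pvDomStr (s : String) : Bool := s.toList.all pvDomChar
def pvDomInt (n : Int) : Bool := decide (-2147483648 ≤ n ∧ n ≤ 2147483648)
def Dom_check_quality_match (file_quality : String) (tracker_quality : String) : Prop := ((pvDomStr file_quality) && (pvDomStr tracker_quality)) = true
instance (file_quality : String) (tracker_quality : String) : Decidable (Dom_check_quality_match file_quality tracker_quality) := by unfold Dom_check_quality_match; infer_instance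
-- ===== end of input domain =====

-- B replaces A's if/elif group cascade with independent keyword->bit masks for both strings and a lowest-set-bit test (alternative decomposition); same return value everywhere.


-- ===== PORT A =====
def check_quality_match (file_quality : String) (tracker_quality : String) : Bool :=
  if file_quality == "" || tracker_quality == "" then false
  else
    let f := PySem.Str.lower file_quality
    let t := PySem.Str.lower tracker_quality
    if f == t then true
    else
      let remux_variants := ["remux", "bdremux", "uhd.remux"]
      let bluray_variants := ["bluray", "blu-ray", "bd", "bdrip"]
      let web_variants := ["web", "web-dl", "webdl", "webrip"]
      let hdtv_variants := ["hdtv", "hdtvrip"]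
      if remux_variants.any (fun v => PySem.Str.isIn v f) then
        remux_variants.any (fun v => PySem.Str.isIn v t)
      else if bluray_variants.any (fun v => PySem.Str.isIn v f) then
        bluray_variants.any (fun v => PySem.Str.isIn v t)
      else if web_variants.any (fun v => PySem.Str.isIn v f) then
        web_variants.any (fun v => PySem.Str.isIn v t)
      else if hdtv_variants.any (fun v => PySem.Str.isIn v f) then
        hdtv_variants.any (fun v => PySem.Str.isIn v t)
      else false

-- ===== PORT B =====
def keywordBits : List (String × Nat) :=
  [("remux", 1), ("bdremux", 1), ("uhd.remux", 1),
   ("bluray", 2), ("blu-ray", 2), ("bd", 2), ("bdrip", 2),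
   ("web", 4), ("web-dl", 4), ("webdl", 4), ("webrip", 4),
   ("hdtv", 8), ("hdtvrip", 8)]

-- the for-loop of Source B's _quality_mask: OR in the bit of each keyword occurring in s
def qualityMask (s : String) : Nat :=
  keywordBits.foldl (fun mask kb => if PySem.Str.isIn kb.1 s then mask ||| kb.2 else mask) 0

def check_quality_match_alt (file_quality : String) (tracker_quality : String) : Bool :=
  if file_quality == "" || tracker_quality == "" then false
  else
    let f := PySem.Str.lower file_quality
    let t := PySem.Str.lower tracker_quality
    if f == t then true
    else
      let fm := qualityMask f
      if fm == 0 then false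
      else
        let low := fm ^^^ (fm &&& (fm - 1))
        (low &&& qualityMask t) != 0

-- ===== PRECONDITION & SPEC =====
def Spec_check_quality_match (file_quality : String) (tracker_quality : String) (out : Bool) : Prop := out = check_quality_match_alt file_quality tracker_quality
instance (file_quality : String) (tracker_quality : String) (out : Bool) : Decidable (Spec_check_quality_match file_quality tracker_quality out) := by unfold Spec_check_quality_match; infer_instance

-- ===== CLAIM (what is proved, stated in full; the proofs are below) =====
def Claim_equal_check_quality_match : Prop := ∀ (file_quality : String) (tracker_quality : String), Dom_check_quality_match file_quality tracker_quality → Spec_check_quality_match file_quality tracker_quality (check_quality_match file_quality tracker_quality)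

-- ===== LEMMAS AND PROOFS =====

-- pull the conditional OR of one keyword bit out of the accumulator
lemma ite_push (h : Prop) [Decidable h] (m b : Nat) : (if h then m ||| b else m) = m ||| (if h then b else 0) := by
  split <;> simp

-- two conditional contributions of the SAME bit merge into one
lemma ite_bit_or (a b : Prop) [Decidable a] [Decidable b] (k : Nat) :
    ((if a then k else 0) ||| (if b then k else 0)) = (if a ∨ b then k else 0) := by
  split_ifs with h1 h2 h2 <;> simp_all [Nat.or_self]

lemma ite_bit_or' (m : Nat) (a b : Prop) [Decidable a] [Decidable b] (k : Nat) :
    ((m ||| if a then k else 0) ||| if b then k else 0) = m ||| if a ∨ b then k else 0 := by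
  rw [Nat.or_assoc, ite_bit_or]

-- the keyword-table fold computes the OR of the four group bits
lemma mask_eq_groups (s : String) :
    qualityMask s =
      (if (PySem.Str.isIn "remux" s || PySem.Str.isIn "bdremux" s || PySem.Str.isIn "uhd.remux" s) then 1 else 0) |||
      (if (PySem.Str.isIn "bluray" s || PySem.Str.isIn "blu-ray" s || PySem.Str.isIn "bd" s || PySem.Str.isIn "bdrip" s) then 2 else 0) |||
      (if (PySem.Str.isIn "web" s || PySem.Str.isIn "web-dl" s || PySem.Str.isIn "webdl" s || PySem.Str.isIn "webrip" s) then 4 else 0) |||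
      (if (PySem.Str.isIn "hdtv" s || PySem.Str.isIn "hdtvrip" s) then 8 else 0) := by
  unfold qualityMask keywordBits
  simp only [List.foldl, ite_push, Nat.zero_or, ite_bit_or, ite_bit_or', or_assoc]
  simp only [Bool.or_eq_true, or_assoc]

-- A's cascade over the four group booleans equals B's lowest-set-bit mask formula
set_option maxHeartbeats 1000000 in
lemma cascade_eq_mask (rf bf wf hf rt bt wt ht : Bool) :
    (if rf then rt else if bf then bt else if wf then wt else if hf then ht else false) =
      (let fm : Nat := (if rf then 1 else 0) ||| (if bf then 2 else 0) ||| (if wf then 4 else 0) ||| (if hf then 8 else 0)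
       let tm : Nat := (if rt then 1 else 0) ||| (if bt then 2 else 0) ||| (if wt then 4 else 0) ||| (if ht then 8 else 0)
       if fm == 0 then false else ((fm ^^^ (fm &&& (fm - 1))) &&& tm) != 0) := by
  revert rf bf wf hf rt bt wt ht
  decide

-- ===== VERDICT (by name: the statement is the Claim_ definition above) =====
theorem check_quality_match_spec : Claim_equal_check_quality_match := by
  intro f t _
  unfold Spec_check_quality_match check_quality_match check_quality_match_alt
  split
  · rfl
  · simp only [List.any_cons, List.any_nil, Bool.or_false, Bool.or_assoc,
      mask_eq_groups, cascade_eq_mask]
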